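-- pv_equiv track=rewrite | github.com/comojin1994/Algorithm_Study | Sungjin/Test/20200927/no1.py | solution
-- ===== SOURCE A (Python) =====
-- from collections import deque
--
-- def solution(m, k):
--     message, key = list(m), deque(list(k))
--     for idx, m in enumerate(message):
--         if len(key) == 0: break
--         if m == key[0]:
--             message[idx] = ''
--             key.popleft()
--     message = ''.join(message)
--     return message
-- ===== SOURCE B (Python) =====
-- def solution(m, k):
--     chars = list(m)
--     pos = 0
--     for c in k:
--         i = m.find(c, pos)
--         if i == -1:
--             break
--         chars[i] = ''
--         pos = i + 1
--     return ''.join(chars)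
-- ===== Notes on version B (the rewrite author's own statement) =====
-- stated objective: alternative
-- what changed: B iterates over the key characters, locating each one's next occurrence in the message with str.find from a running position pointer, instead of A's single pass over the message with a deque of pending key characters.
import Mathlib
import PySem

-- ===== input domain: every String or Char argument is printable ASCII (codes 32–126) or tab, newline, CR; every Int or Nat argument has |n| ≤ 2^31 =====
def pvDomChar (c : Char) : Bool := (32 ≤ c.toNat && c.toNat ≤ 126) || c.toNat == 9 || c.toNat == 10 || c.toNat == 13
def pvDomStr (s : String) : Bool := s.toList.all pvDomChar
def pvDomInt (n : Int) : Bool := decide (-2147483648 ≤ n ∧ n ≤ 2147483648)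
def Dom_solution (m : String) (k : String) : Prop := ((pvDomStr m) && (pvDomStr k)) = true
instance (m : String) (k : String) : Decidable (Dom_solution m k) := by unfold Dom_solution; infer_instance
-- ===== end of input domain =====

-- B loops over the key characters with a running find pointer instead of A's single
-- message pass with a deque of pending key chars; objective: alternative (a different decomposition of the same greedy matching).
-- Blanked cells (message[idx] = '') are modelled as `none`; ''.join = filterMap id.

-- ===== PORT A =====
-- A's loop over enumerate(message): break when key empty; blank and popleft on match.
def aLoop : List Char → List Char → List (Option Char)
  | [], _ => []
  | c :: rest, [] => some c :: rest.map some            -- break: rest of message unchanged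
  | c :: rest, kc :: ks =>
      if c = kc then none :: aLoop rest ks
      else some c :: aLoop rest (kc :: ks)

def solution (m : String) (k : String) : String :=
  String.ofList ((aLoop m.toList k.toList).filterMap id)

-- ===== PORT B =====
-- str.find(c, pos): first index ≥ pos holding c (none = Python's -1); exact hand port.
def findFrom (s : List Char) (c : Char) (pos : Nat) : Option Nat :=
  ((s.drop pos).findIdx? (· = c)).map (pos + ·)

def bLoop (m : List Char) : List Char → List (Option Char) → Nat → List (Option Char)
  | [], chars, _ => chars
  | c :: ks, chars, pos =>
      match findFrom m c pos with
      | none => chars                                    -- break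
      | some i => bLoop m ks (chars.set i none) (i + 1)

def solution_alt (m : String) (k : String) : String :=
  String.ofList ((bLoop m.toList k.toList (m.toList.map some) 0).filterMap id)

-- ===== PRECONDITION & SPEC =====
def Spec_solution (m : String) (k : String) (out : String) : Prop := out = solution_alt m k
instance (m : String) (k : String) (out : String) : Decidable (Spec_solution m k out) := by unfold Spec_solution; infer_instance

-- ===== CLAIM (what is proved, stated in full; the proofs are below) =====
def Claim_equal_solution : Prop := ∀ (m : String) (k : String), Dom_solution m k → Spec_solution m k (solution m k)

-- ===== LEMMAS AND PROOFS =====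

theorem aLoop_nil_key (xs : List Char) : aLoop xs [] = xs.map some := by
  cases xs <;> rfl

theorem aLoop_not_mem (xs : List Char) (c : Char) (ks : List Char) (h : c ∉ xs) :
    aLoop xs (c :: ks) = xs.map some := by
  induction xs with
  | nil => rfl
  | cons x rest ih =>
      simp only [List.mem_cons, not_or] at h
      simp [aLoop, Ne.symm h.1, ih h.2]

theorem aLoop_split (u : List Char) (c : Char) (v : List Char) (ks : List Char) (h : c ∉ u) :
    aLoop (u ++ c :: v) (c :: ks) = u.map some ++ none :: aLoop v ks := by
  induction u with
  | nil => simp [aLoop]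
  | cons x rest ih =>
      simp only [List.mem_cons, not_or] at h
      simp [aLoop, Ne.symm h.1, ih h.2]

theorem bLoop_eq (m : List Char) (ks : List Char) :
    ∀ (chars : List (Option Char)) (pos : Nat),
      chars.length = m.length →
      (∀ j, pos ≤ j → chars[j]? = (m.map some)[j]?) →
      bLoop m ks chars pos = chars.take pos ++ aLoop (m.drop pos) ks := by
  induction ks with
  | nil =>
      intro chars pos hlen hagree
      have hd : chars.drop pos = (m.drop pos).map some := by
        apply List.ext_getElem?
        intro j
        simp only [List.getElem?_drop]
        rw [hagree (pos + j) (Nat.le_add_right _ _)]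
        simp [List.getElem?_map, List.getElem?_drop]
      calc bLoop m [] chars pos = chars.take pos ++ chars.drop pos := by
              rw [List.take_append_drop]; rfl
        _ = chars.take pos ++ aLoop (m.drop pos) [] := by
              rw [hd, aLoop_nil_key, List.map_drop]
  | cons c ks ih =>
      intro chars pos hlen hagree
      show (match findFrom m c pos with
            | none => chars
            | some i => bLoop m ks (chars.set i none) (i + 1)) = _
      unfold findFrom
      cases hfind : (m.drop pos).findIdx? (· = c) with
      | none =>
          have hnm : c ∉ m.drop pos := by
            intro hmem
            have := List.findIdx?_eq_none_iff.mp hfind c hmem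
            simp at this
          simp only [Option.map_none]
          have hd : chars.drop pos = (m.drop pos).map some := by
            apply List.ext_getElem?
            intro j
            simp only [List.getElem?_drop]
            rw [hagree (pos + j) (Nat.le_add_right _ _)]
            simp [List.getElem?_map, List.getElem?_drop]
          rw [aLoop_not_mem _ _ _ hnm, ← hd, List.take_append_drop]
      | some t =>
          simp only [Option.map_some]
          -- characterise the first occurrence
          obtain ⟨hlt, hget, hprev⟩ := List.findIdx?_eq_some_iff_getElem.mp hfind
          have hc : (m.drop pos)[t] = c := by
            have := hget; simpa using this
          set i := pos + t with hi
          have hilen : i < m.length := by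
            have := hlt
            simp only [List.length_drop] at this
            omega
          -- decomposition of m.drop pos around index t
          have hsplit : m.drop pos = (m.drop pos).take t ++ c :: m.drop (i + 1) := by
            have h1 : m.drop pos = (m.drop pos).take t ++ (m.drop pos).drop t :=
              (List.take_append_drop _ _).symm
            have h2 : (m.drop pos).drop t = c :: m.drop (i + 1) := by
              have h3 : (m.drop pos).drop t = m.drop i := by
                rw [List.drop_drop]
              rw [h3]
              have h4 : m.drop i = m[i] :: m.drop (i + 1) :=
                List.drop_eq_getElem_cons hilen
              have h5 : m[i] = c := by
                have := hc
                rwa [List.getElem_drop] at this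
              rw [h4, h5]
            rw [← h2]; exact h1
          have hnotmem : c ∉ (m.drop pos).take t := by
            intro hmem
            obtain ⟨j, hj, hje⟩ := List.getElem_of_mem hmem
            have hjt : j < t := lt_of_lt_of_le hj (by simp)
            have := hprev j hjt
            have hjg : ((m.drop pos).take t)[j] = (m.drop pos)[j]'(by
              have := hlt; omega) := List.getElem_take
            rw [hjg] at hje
            simp [hje] at this
          -- IH applies to the updated state
          have hlen' : (chars.set i none).length = m.length := by simp [hlen]
          have hagree' : ∀ j, i + 1 ≤ j →
              (chars.set i none)[j]? = (m.map some)[j]? := by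
            intro j hj
            rw [List.getElem?_set_ne (by omega)]
            exact hagree j (by omega)
          rw [ih _ _ hlen' hagree']
          -- now rewrite both sides into the same shape
          rw [hsplit, aLoop_split _ _ _ _ hnotmem]
          -- (chars.set i none).take (i+1) = chars.take pos ++ (take t of drop).map some ++ [none]
          have htake : (chars.set i none).take (i + 1)
              = chars.take pos ++ ((m.drop pos).take t).map some ++ [none] := by
            apply List.ext_getElem?
            intro j
            by_cases hj1 : j < i + 1
            · rw [List.getElem?_take_of_lt hj1]
              by_cases hj2 : j < pos
              · rw [List.getElem?_set_ne (by omega)]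
                rw [List.getElem?_append_left (by
                  simp only [List.length_append, List.length_take,
                    List.length_map]
                  have : pos ≤ chars.length := by omega
                  omega)]
                rw [List.getElem?_append_left (by
                  simp only [List.length_take]
                  have : pos ≤ chars.length := by omega
                  omega)]
                rw [List.getElem?_take_of_lt hj2]
              · by_cases hj3 : j < i
                · rw [List.getElem?_set_ne (by omega)]
                  have hcl : chars.length = m.length := hlen
                  have hptake : (chars.take pos).length = pos := by
                    simp [List.length_take]; omega
                  rw [List.getElem?_append_left (by
                    simp only [List.length_append, hptake, List.length_map,
                      List.length_take, List.length_drop]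
                    omega)]
                  rw [List.getElem?_append_right (by omega)]
                  rw [hptake]
                  rw [hagree j (by omega)]
                  rw [List.getElem?_map, List.getElem?_map,
                    List.getElem?_take_of_lt (show j - pos < t by omega),
                    List.getElem?_drop]
                  congr 2
                  omega
                · have hji : j = i := by omega
                  subst hji
                  rw [List.getElem?_set_self (by omega)]
                  have hptake : (chars.take pos).length = pos := by
                    simp [List.length_take]; omega
                  have hmtake : (((m.drop pos).take t).map some).length = t := by
                    simp only [List.length_map, List.length_take, List.length_drop]
                    omega
                  rw [List.getElem?_append_right (by
                    simp only [List.length_append, hptake, hmtake]; omega)]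
                  simp only [List.length_append, hptake, hmtake]
                  have : i - (pos + t) = 0 := by omega
                  rw [this]
                  rfl
            · rw [List.getElem?_eq_none (by
                simp only [List.length_take, List.length_set]
                omega)]
              rw [List.getElem?_eq_none (by
                have hlt' : t < m.length - pos := by simpa using hlt
                simp only [List.length_append, List.length_take, List.length_map,
                  List.length_drop, List.length_cons, List.length_nil]
                have : pos ≤ chars.length := by omega
                simp only [hlen]
                omega)]
          rw [htake]
          simp [List.append_assoc]

-- ===== VERDICT (by name: the statement is the Claim_ definition above) =====
theorem solution_spec : Claim_equal_solution := by
  intro m k _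
  show solution m k = solution_alt m k
  unfold solution solution_alt
  congr 1
  rw [bLoop_eq m.toList k.toList (m.toList.map some) 0 (by simp)
    (fun j _ => rfl)]
  simp
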